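-- pv_equiv track=rewrite | github.com/MikeTsenatek/aoc2023 | 01/main.py | replace_first_last_occurrence
-- ===== SOURCE A (Python) =====
-- replacements = {
--     "one": "1",
--     "two": "2",
--     "three": "3",
--     "four": "4",
--     "five": "5",
--     "six": "6",
--     "seven": "7",
--     "eight": "8",
--     "nine": "9"
-- }
--
-- def replace_first_last_occurrence(input_string):
--
--     first_occurrence = len(input_string)
--     last_occurrence = 0
--     first_number = 0
--     last_number = 0
--     first_string = ""
--     last_string = ""
--
--     for word, replacement in replacements.items():
--         first = input_string.find(word)
--         if first >= 0 and first < first_occurrence: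
--             first_occurrence = input_string.find(word)
--             first_number = word
--             first_string = replacement
--
--     input_string = input_string[:first_occurrence] + first_string + input_string[first_occurrence+len(str(first_number)):]
--     nowordfound = True
--     for word, replacement in replacements.items():
--         last = input_string.rfind(word)
--         if last >= 0 and last > last_occurrence:
--             nowordfound = False
--             last_occurrence = input_string.rfind(word)
--             last_number = word
--             last_string = replacement
--
--     if not nowordfound:
--         input_string = input_string[:last_occurrence] + last_string + input_string[last_occurrence+len(str(last_number)):]
--
--
--     return input_string
-- ===== SOURCE B (Python) =====
-- replacements = {
--     "one": "1",
--     "two": "2",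
--     "three": "3",
--     "four": "4",
--     "five": "5",
--     "six": "6",
--     "seven": "7",
--     "eight": "8",
--     "nine": "9"
-- }
--
-- def _word_at(s, i):
--     # first (word, digit) in dict order that starts at position i, else None
--     for w, d in replacements.items():
--         if s.startswith(w, i):
--             return (w, d)
--     return None
--
-- def replace_first_last_occurrence(input_string):
--     s = input_string
--     # phase 1: scan positions left to right, splice the digit of the first word found
--     for i in range(len(s)):
--         hit = _word_at(s, i)
--         if hit is not None:
--             w, d = hit
--             s = s[:i] + d + s[i + len(w):]
--             break
--     # phase 2: scan the modified string right to left, splice the digit of the last word found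
--     for i in range(len(s) - 1, -1, -1):
--         hit = _word_at(s, i)
--         if hit is not None:
--             w, d = hit
--             s = s[:i] + d + s[i + len(w):]
--             break
--     return s
-- ===== Notes on version B (the rewrite author's own statement) =====
-- stated objective: alternative
-- what changed: A selects min(find)/max(rfind) over all nine words (18 full string searches) and then splices; B does one positional scan per phase - left-to-right to the first position where any word starts, then right-to-left over the modified string to the last such position - splicing at the hit and stopping early.
import Mathlib
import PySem

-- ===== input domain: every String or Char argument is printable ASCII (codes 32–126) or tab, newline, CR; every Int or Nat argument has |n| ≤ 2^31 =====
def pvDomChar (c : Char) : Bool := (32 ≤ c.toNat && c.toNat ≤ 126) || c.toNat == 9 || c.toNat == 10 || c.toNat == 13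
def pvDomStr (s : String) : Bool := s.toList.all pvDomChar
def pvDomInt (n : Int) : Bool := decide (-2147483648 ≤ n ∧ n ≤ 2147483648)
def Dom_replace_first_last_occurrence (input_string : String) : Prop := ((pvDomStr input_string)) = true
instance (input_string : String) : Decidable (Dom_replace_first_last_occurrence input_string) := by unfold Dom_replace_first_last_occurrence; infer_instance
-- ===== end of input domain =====

-- B replaces A's per-word find/rfind min/max selection by one positional scan per phase
-- (left-to-right for the first word, right-to-left over the modified string for the last),
-- stopping at the first hit; objective: alternative (same exact return value).

-- the replacements dict, in insertion order (word as code points, digit replacement)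
def pvReps : List (List Char × Char) :=
  [(['o','n','e'], '1'), (['t','w','o'], '2'), (['t','h','r','e','e'], '3'),
   (['f','o','u','r'], '4'), (['f','i','v','e'], '5'), (['s','i','x'], '6'),
   (['s','e','v','e','n'], '7'), (['e','i','g','h','t'], '8'), (['n','i','n','e'], '9')]

-- ===== PORT A =====
-- len(str(x)) where x holds the int 0 or a word string
def pvLenStr : Int ⊕ List Char → Nat
  | .inl n => (PySem.Int.toChars n).length
  | .inr w => w.length

-- s[:i] + r + s[i+k:]  (i an int, exactly as A slices)
def pvSplice (s : List Char) (i : Int) (r : List Char) (k : Nat) : List Char :=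
  PySem.List.slice s none (some i) ++ r ++ PySem.List.slice s (some (i + (k : Int))) none

-- A's first loop: state (first_occurrence, first_number, first_string)
def pvPhase1A (s : List Char) : Int × (Int ⊕ List Char) × List Char :=
  pvReps.foldl
    (fun st wd =>
      let first := PySem.Chars.find s wd.1
      if 0 ≤ first ∧ first < st.1 then (PySem.Chars.find s wd.1, Sum.inr wd.1, [wd.2]) else st)
    ((s.length : Int), Sum.inl 0, [])

-- A's second loop: state (nowordfound, last_occurrence, last_number, last_string)
def pvPhase2A (t : List Char) : Bool × Int × (Int ⊕ List Char) × List Char :=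
  pvReps.foldl
    (fun st wd =>
      let last := PySem.Chars.rfind t wd.1
      if 0 ≤ last ∧ st.2.1 < last then (false, PySem.Chars.rfind t wd.1, Sum.inr wd.1, [wd.2]) else st)
    (true, 0, Sum.inl 0, [])

def replace_first_last_occurrence (input_string : String) : String :=
  let s := input_string.toList
  let p1 := pvPhase1A s
  let t := pvSplice s p1.1 p1.2.2 (pvLenStr p1.2.1)
  let p2 := pvPhase2A t
  String.ofList (if p2.1 then t else pvSplice t p2.2.1 p2.2.2.2 (pvLenStr p2.2.2.1))

-- ===== PORT B =====
-- _word_at(s, i): first (word, digit) of the dict that starts at position i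
-- (s.startswith(w, i) with 0 ≤ i is exactly: w is a prefix of s[i:])
def pvWordAt (s : List Char) (i : Nat) : Option (List Char × Char) :=
  pvReps.find? (fun wd => PySem.Chars.startswith (s.drop i) wd.1)

-- phase-1 loop of B: for i in range(len(s)): splice and break at the first hit
def pvScanUp (s : List Char) (i : Nat) : List Char :=
  if _h : i < s.length then
    match pvWordAt s i with
    | some wd => s.take i ++ [wd.2] ++ s.drop (i + wd.1.length)
    | none => pvScanUp s (i + 1)
  else s
termination_by s.length - i

-- phase-2 loop of B: for i in range(len(s)-1, -1, -1); the argument is i + 1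
def pvScanDown (s : List Char) : Nat → List Char
  | 0 => s
  | j + 1 =>
    match pvWordAt s j with
    | some wd => s.take j ++ [wd.2] ++ s.drop (j + wd.1.length)
    | none => pvScanDown s j

def replace_first_last_occurrence_alt (input_string : String) : String :=
  let t := pvScanUp input_string.toList 0
  String.ofList (pvScanDown t t.length)

-- ===== PRECONDITION & SPEC =====
def Spec_replace_first_last_occurrence (input_string : String) (out : String) : Prop := out = replace_first_last_occurrence_alt input_string
instance (input_string : String) (out : String) : Decidable (Spec_replace_first_last_occurrence input_string out) := by unfold Spec_replace_first_last_occurrence; infer_instance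

-- ===== CLAIM (what is proved, stated in full; the proofs are below) =====
def Claim_equal_replace_first_last_occurrence : Prop := ∀ (input_string : String), Dom_replace_first_last_occurrence input_string → Spec_replace_first_last_occurrence input_string (replace_first_last_occurrence input_string)

-- ===== LEMMAS AND PROOFS =====

def pvMb (s : List Char) (i : Nat) : Bool := pvReps.any (fun wd => wd.1.isPrefixOf (s.drop i))

theorem pvMb_true_iff (s : List Char) (i : Nat) :
    pvMb s i = true ↔ ∃ wd ∈ pvReps, wd.1 <+: s.drop i := by
  simp [pvMb, List.any_eq_true, List.isPrefixOf_iff_prefix]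

theorem pvInfix {s w : List Char} {i : Nat} (h : w <+: s.drop i) : w <:+: s :=
  h.isInfix.trans (List.drop_suffix i s).isInfix

theorem pvWordAt_none (s : List Char) (i : Nat) (h : pvMb s i = false) :
    pvWordAt s i = none := by
  rw [pvWordAt, List.find?_eq_none]
  intro wd hwd hp
  rw [PySem.Chars.startswith_iff] at hp
  have : pvMb s i = true := (pvMb_true_iff s i).2 ⟨wd, hwd, hp⟩
  simp [this] at h

theorem pvNoPrefix : ∀ wd ∈ pvReps, ∀ wd' ∈ pvReps, wd.1 <+: wd'.1 → wd = wd' := by decide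

theorem pvWordNe : ∀ wd ∈ pvReps, wd.1 ≠ [] := by decide

theorem pvDigitNotIn : ∀ wd ∈ pvReps, ∀ wd' ∈ pvReps, wd'.2 ∉ wd.1 := by decide

theorem pvUniq {u : List Char} {wd wd' : List Char × Char} (h : wd ∈ pvReps) (h' : wd' ∈ pvReps)
    (hp : wd.1 <+: u) (hp' : wd'.1 <+: u) : wd = wd' := by
  rcases List.prefix_or_prefix_of_prefix hp hp' with h1 | h1
  · exact pvNoPrefix _ h _ h' h1
  · exact (pvNoPrefix _ h' _ h h1).symm

theorem pvWordAt_some {s : List Char} {i : Nat} {wd : List Char × Char}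
    (hm : wd ∈ pvReps) (hp : wd.1 <+: s.drop i) : pvWordAt s i = some wd := by
  have hsome : (pvWordAt s i).isSome = true := by
    rw [pvWordAt, List.find?_isSome]
    exact ⟨wd, hm, by rw [PySem.Chars.startswith_iff]; exact hp⟩
  obtain ⟨wd', hw'⟩ := Option.isSome_iff_exists.1 hsome
  have hmem := List.mem_of_find?_eq_some hw'
  have hsat := List.find?_some hw'
  rw [PySem.Chars.startswith_iff] at hsat
  rw [hw', pvUniq hmem hm hsat hp]

theorem pvPos_lt {s : List Char} {i : Nat} (h : pvMb s i = true) : i < s.length := by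
  obtain ⟨wd, hm, hp⟩ := (pvMb_true_iff s i).1 h
  have hne := pvWordNe _ hm
  rcases hp with ⟨t, ht⟩
  by_contra hle
  have : s.drop i = [] := List.drop_eq_nil_of_le (by omega)
  rw [this] at ht
  exact hne (List.append_eq_nil_iff.1 ht).1

theorem pvFind_eq {s w : List Char} {i : Nat} (hp : w <+: s.drop i)
    (hmin : ∀ j < i, ¬ w <+: s.drop j) : PySem.Chars.find s w = (i : Int) := by
  have hnn : 0 ≤ PySem.Chars.find s w := (PySem.Chars.find_nonneg_iff s w).2 (pvInfix hp)
  obtain ⟨hocc, hm⟩ := PySem.Chars.find_spec hnn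
  have h1 : ¬ i < (PySem.Chars.find s w).toNat := fun hlt => hm i hlt hp
  have h2 : ¬ (PySem.Chars.find s w).toNat < i := fun hlt => hmin _ hlt hocc
  omega

theorem pvFind_occ {s w : List Char} (h : 0 ≤ PySem.Chars.find s w) :
    w <+: s.drop (PySem.Chars.find s w).toNat := (PySem.Chars.find_spec h).1

theorem pvRfindGo_spec (s w : List Char) : ∀ n : Nat,
    (PySem.Chars.rfind.go s w n = -1 ∧ ∀ j ≤ n, ¬ w <+: s.drop j) ∨
    (∃ j, j ≤ n ∧ PySem.Chars.rfind.go s w n = (j : Int) ∧ w <+: s.drop j ∧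
      ∀ k, j < k → k ≤ n → ¬ w <+: s.drop k) := by
  intro n
  induction n with
  | zero =>
    by_cases h : w.isPrefixOf s
    · right; exact ⟨0, le_refl 0, by simp [PySem.Chars.rfind.go, h], by
        simpa [List.isPrefixOf_iff_prefix] using h, by omega⟩
    · left
      refine ⟨by simp [PySem.Chars.rfind.go, h], ?_⟩
      intro j hj
      interval_cases j
      simpa [List.isPrefixOf_iff_prefix] using h
  | succ m ih =>
    by_cases h : w.isPrefixOf (s.drop (m+1))
    · right
      exact ⟨m+1, le_refl _, by simp [PySem.Chars.rfind.go, h], by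
        simpa [List.isPrefixOf_iff_prefix] using h, by omega⟩
    · have hgo : PySem.Chars.rfind.go s w (m+1) = PySem.Chars.rfind.go s w m := by
        simp [PySem.Chars.rfind.go, h]
      have hnp : ¬ w <+: s.drop (m+1) := by simpa [List.isPrefixOf_iff_prefix] using h
      rcases ih with ⟨h1, h2⟩ | ⟨j, hj, he, hp, hmax⟩
      · left
        refine ⟨by rw [hgo]; exact h1, ?_⟩
        intro j hj
        rcases Nat.lt_or_ge j (m+1) with hlt | hge
        · exact h2 j (by omega)
        · have : j = m+1 := by omega
          subst this; exact hnp
      · right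
        refine ⟨j, by omega, by rw [hgo]; exact he, hp, ?_⟩
        intro k hk1 hk2
        rcases Nat.lt_or_ge k (m+1) with hlt | hge
        · exact hmax k hk1 (by omega)
        · have : k = m+1 := by omega
          subst this; exact hnp

theorem pvScanUp_none {s : List Char} (h : ∀ j, pvMb s j = false) (i : Nat) :
    pvScanUp s i = s := by
  rw [pvScanUp]
  split
  · rw [pvWordAt_none s i (h i)]
    exact pvScanUp_none h (i+1)
  · rfl
termination_by s.length - i

theorem pvScanUp_hit {s : List Char} {i0 : Nat} {wd : List Char × Char}
    (hw : pvWordAt s i0 = some wd) (hmin : ∀ j < i0, pvMb s j = false) (hlt : i0 < s.length)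
    (i : Nat) (hi : i ≤ i0) : pvScanUp s i = s.take i0 ++ [wd.2] ++ s.drop (i0 + wd.1.length) := by
  rw [pvScanUp]
  rcases Nat.lt_or_ge i i0 with hlt2 | hge
  · rw [dif_pos (by omega), pvWordAt_none s i (hmin i hlt2)]
    exact pvScanUp_hit hw hmin hlt (i+1) (by omega)
  · have : i = i0 := by omega
    subst this
    rw [dif_pos hlt, hw]
termination_by s.length - i

theorem pvScanDown_none {s : List Char} (h : ∀ j, j < s.length → pvMb s j = false) :
    ∀ n, n ≤ s.length → pvScanDown s n = s := by
  intro n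
  induction n with
  | zero => intro _; rfl
  | succ m ih =>
    intro hle
    rw [pvScanDown, pvWordAt_none s m (h m (by omega))]
    exact ih (by omega)

theorem pvScanDown_hit {s : List Char} {j0 : Nat} {wd : List Char × Char}
    (hw : pvWordAt s j0 = some wd) (hmax : ∀ k, j0 < k → k < s.length → pvMb s k = false) :
    ∀ n, j0 < n → n ≤ s.length → pvScanDown s n = s.take j0 ++ [wd.2] ++ s.drop (j0 + wd.1.length) := by
  intro n
  induction n with
  | zero => omega
  | succ m ih =>
    intro h1 h2
    rcases Nat.lt_or_ge j0 m with hlt | hge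
    · rw [pvScanDown, pvWordAt_none s m (hmax m hlt (by omega))]
      exact ih hlt (by omega)
    · have : j0 = m := by omega
      subst this
      rw [pvScanDown, hw]

theorem pvFold1_spec (s : List Char) (l : List (List Char × Char)) :
    ∀ st : Int × (Int ⊕ List Char) × List Char,
    (l.foldl (fun st wd =>
        let first := PySem.Chars.find s wd.1
        if 0 ≤ first ∧ first < st.1 then (PySem.Chars.find s wd.1, Sum.inr wd.1, [wd.2]) else st) st
      = st ∨ ∃ wd ∈ l, 0 ≤ PySem.Chars.find s wd.1 ∧
        l.foldl (fun st wd =>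
          let first := PySem.Chars.find s wd.1
          if 0 ≤ first ∧ first < st.1 then (PySem.Chars.find s wd.1, Sum.inr wd.1, [wd.2]) else st) st
        = (PySem.Chars.find s wd.1, Sum.inr wd.1, [wd.2])) ∧
    (l.foldl (fun st wd =>
        let first := PySem.Chars.find s wd.1
        if 0 ≤ first ∧ first < st.1 then (PySem.Chars.find s wd.1, Sum.inr wd.1, [wd.2]) else st) st).1 ≤ st.1 ∧
    (∀ wd ∈ l, 0 ≤ PySem.Chars.find s wd.1 →
      (l.foldl (fun st wd =>
        let first := PySem.Chars.find s wd.1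
        if 0 ≤ first ∧ first < st.1 then (PySem.Chars.find s wd.1, Sum.inr wd.1, [wd.2]) else st) st).1
        ≤ PySem.Chars.find s wd.1) := by
  induction l with
  | nil => intro st; refine ⟨Or.inl rfl, le_refl _, by simp⟩
  | cons hd tl ih =>
    intro st
    simp only [List.foldl_cons]
    by_cases hc : 0 ≤ PySem.Chars.find s hd.1 ∧ PySem.Chars.find s hd.1 < st.1
    · rw [if_pos hc]
      obtain ⟨hcases, hmono, hall⟩ := ih (PySem.Chars.find s hd.1, Sum.inr hd.1, [hd.2])
      refine ⟨?_, by simpa using le_trans hmono (le_of_lt hc.2), ?_⟩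
      · rcases hcases with h | ⟨wd, hwd, hnn, he⟩
        · exact Or.inr ⟨hd, List.mem_cons_self, hc.1, h⟩
        · exact Or.inr ⟨wd, List.mem_cons_of_mem _ hwd, hnn, he⟩
      · intro wd hwd hnn
        rcases List.mem_cons.1 hwd with h | h
        · subst h; simpa using hmono
        · exact hall wd h hnn
    · rw [if_neg hc]
      obtain ⟨hcases, hmono, hall⟩ := ih st
      refine ⟨?_, hmono, ?_⟩
      · rcases hcases with h | ⟨wd, hwd, hnn, he⟩
        · exact Or.inl h
        · exact Or.inr ⟨wd, List.mem_cons_of_mem _ hwd, hnn, he⟩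
      · intro wd hwd hnn
        rcases List.mem_cons.1 hwd with h | h
        · subst h
          have : st.1 ≤ PySem.Chars.find s wd.1 := by
            rcases not_and_or.1 hc with h' | h'
            · exact absurd hnn h'
            · omega
          exact le_trans hmono this
        · exact hall wd h hnn

theorem pvFold2_spec (t : List Char) (l : List (List Char × Char)) :
    ∀ st : Bool × Int × (Int ⊕ List Char) × List Char,
    (l.foldl (fun st wd =>
        let last := PySem.Chars.rfind t wd.1
        if 0 ≤ last ∧ st.2.1 < last then (false, PySem.Chars.rfind t wd.1, Sum.inr wd.1, [wd.2]) else st) st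
      = st ∨ ∃ wd ∈ l, 0 ≤ PySem.Chars.rfind t wd.1 ∧
        l.foldl (fun st wd =>
          let last := PySem.Chars.rfind t wd.1
          if 0 ≤ last ∧ st.2.1 < last then (false, PySem.Chars.rfind t wd.1, Sum.inr wd.1, [wd.2]) else st) st
        = (false, PySem.Chars.rfind t wd.1, Sum.inr wd.1, [wd.2])) ∧
    st.2.1 ≤ (l.foldl (fun st wd =>
        let last := PySem.Chars.rfind t wd.1
        if 0 ≤ last ∧ st.2.1 < last then (false, PySem.Chars.rfind t wd.1, Sum.inr wd.1, [wd.2]) else st) st).2.1 ∧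
    (∀ wd ∈ l, 0 ≤ PySem.Chars.rfind t wd.1 →
      PySem.Chars.rfind t wd.1 ≤ (l.foldl (fun st wd =>
        let last := PySem.Chars.rfind t wd.1
        if 0 ≤ last ∧ st.2.1 < last then (false, PySem.Chars.rfind t wd.1, Sum.inr wd.1, [wd.2]) else st) st).2.1) := by
  induction l with
  | nil => intro st; refine ⟨Or.inl rfl, le_refl _, by simp⟩
  | cons hd tl ih =>
    intro st
    simp only [List.foldl_cons]
    by_cases hc : 0 ≤ PySem.Chars.rfind t hd.1 ∧ st.2.1 < PySem.Chars.rfind t hd.1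
    · rw [if_pos hc]
      obtain ⟨hcases, hmono, hall⟩ := ih (false, PySem.Chars.rfind t hd.1, Sum.inr hd.1, [hd.2])
      refine ⟨?_, le_trans (le_of_lt hc.2) (by simpa using hmono), ?_⟩
      · rcases hcases with h | ⟨wd, hwd, hnn, he⟩
        · exact Or.inr ⟨hd, List.mem_cons_self, hc.1, h⟩
        · exact Or.inr ⟨wd, List.mem_cons_of_mem _ hwd, hnn, he⟩
      · intro wd hwd hnn
        rcases List.mem_cons.1 hwd with h | h
        · subst h; simpa using hmono
        · exact hall wd h hnn
    · rw [if_neg hc]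
      obtain ⟨hcases, hmono, hall⟩ := ih st
      refine ⟨?_, hmono, ?_⟩
      · rcases hcases with h | ⟨wd, hwd, hnn, he⟩
        · exact Or.inl h
        · exact Or.inr ⟨wd, List.mem_cons_of_mem _ hwd, hnn, he⟩
      · intro wd hwd hnn
        rcases List.mem_cons.1 hwd with h | h
        · subst h
          have : PySem.Chars.rfind t wd.1 ≤ st.2.1 := by
            rcases not_and_or.1 hc with h' | h'
            · exact absurd hnn h'
            · omega
          exact le_trans this hmono
        · exact hall wd h hnn

theorem pvSplice_nat (s : List Char) (i : Nat) (r : List Char) (k : Nat) :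
    pvSplice s (i : Int) r k = s.take i ++ r ++ s.drop (i + k) := by
  rw [pvSplice, PySem.List.slice_to_natCast]
  have : (i : Int) + (k : Int) = ((i + k : Nat) : Int) := by push_cast; ring
  rw [this, PySem.List.slice_from_natCast]

theorem pvPhase1_eq (s : List Char) :
    pvSplice s (pvPhase1A s).1 (pvPhase1A s).2.2 (pvLenStr (pvPhase1A s).2.1) = pvScanUp s 0 := by
  by_cases hex : ∃ i, pvMb s i = true
  · set i0 := Nat.find hex with hi0
    have hP : pvMb s i0 = true := Nat.find_spec hex
    have hmin : ∀ j < i0, pvMb s j = false := fun j hj =>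
      Bool.not_eq_true _ ▸ (by simpa using Nat.find_min hex hj)
    obtain ⟨wd0, hm0, hp0⟩ := (pvMb_true_iff s i0).1 hP
    have hlt : i0 < s.length := pvPos_lt hP
    have hF0 : PySem.Chars.find s wd0.1 = (i0 : Int) := by
      refine pvFind_eq hp0 ?_
      intro j hj hpre
      have : pvMb s j = true := (pvMb_true_iff s j).2 ⟨wd0, hm0, hpre⟩
      rw [hmin j hj] at this; exact Bool.false_ne_true this
    obtain ⟨hcases, hmono, hall⟩ := pvFold1_spec s pvReps ((s.length : Int), Sum.inl 0, [])
    have hfold : pvPhase1A s = pvReps.foldl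
      (fun st wd =>
        let first := PySem.Chars.find s wd.1
        if 0 ≤ first ∧ first < st.1 then (PySem.Chars.find s wd.1, Sum.inr wd.1, [wd.2]) else st)
      ((s.length : Int), Sum.inl 0, []) := rfl
    rw [← hfold] at hcases hmono hall
    have hle0 : (pvPhase1A s).1 ≤ (i0 : Int) := by
      have := hall wd0 hm0 (by rw [hF0]; positivity)
      rwa [hF0] at this
    rcases hcases with hid | ⟨wd, hwd, hnn, he⟩
    · exfalso
      rw [hid] at hle0
      simp at hle0; omega
    · have hocc := pvFind_occ hnn
      have hge : (i0 : Int) ≤ PySem.Chars.find s wd.1 := by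
        have : pvMb s (PySem.Chars.find s wd.1).toNat = true :=
          (pvMb_true_iff _ _).2 ⟨wd, hwd, hocc⟩
        have h2 : Nat.find hex ≤ (PySem.Chars.find s wd.1).toNat := Nat.find_le this
        omega
      have hFeq : PySem.Chars.find s wd.1 = (i0 : Int) := by
        have : (pvPhase1A s).1 = PySem.Chars.find s wd.1 := by rw [he]
        omega
      have hweq : wd = wd0 := by
        have : wd.1 <+: s.drop i0 := by
          have := hocc; rw [hFeq] at this; simpa using this
        exact pvUniq hwd hm0 this hp0
      rw [he, hweq]
      dsimp only [pvLenStr]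
      rw [hF0]
      have hB := pvScanUp_hit (pvWordAt_some hm0 hp0) hmin hlt 0 (Nat.zero_le _)
      rw [hB, pvSplice_nat]
  · have hno : ∀ i, pvMb s i = false := fun i =>
      Bool.not_eq_true _ ▸ (by simpa using not_exists.1 hex i)
    obtain ⟨hcases, hmono, hall⟩ := pvFold1_spec s pvReps ((s.length : Int), Sum.inl 0, [])
    have hfold : pvPhase1A s = pvReps.foldl
      (fun st wd =>
        let first := PySem.Chars.find s wd.1
        if 0 ≤ first ∧ first < st.1 then (PySem.Chars.find s wd.1, Sum.inr wd.1, [wd.2]) else st)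
      ((s.length : Int), Sum.inl 0, []) := rfl
    rw [← hfold] at hcases
    rcases hcases with hid | ⟨wd, hwd, hnn, _⟩
    · rw [hid]
      show pvSplice s (s.length : Int) [] (pvLenStr (Sum.inl 0)) = _
      have hlen : pvLenStr (Sum.inl 0) = 1 := rfl
      rw [hlen, pvSplice_nat, pvScanUp_none hno 0]
      simp [List.drop_eq_nil_of_le]
    · exfalso
      have hocc := pvFind_occ hnn
      have : pvMb s (PySem.Chars.find s wd.1).toNat = true := (pvMb_true_iff _ _).2 ⟨wd, hwd, hocc⟩
      rw [hno] at this; exact Bool.false_ne_true this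

theorem pvNoMatchZero (s : List Char) : pvMb (pvScanUp s 0) 0 = false := by
  by_cases hex : ∃ i, pvMb s i = true
  · set i0 := Nat.find hex with hi0
    have hP : pvMb s i0 = true := Nat.find_spec hex
    have hmin : ∀ j < i0, pvMb s j = false := fun j hj =>
      Bool.not_eq_true _ ▸ (by simpa using Nat.find_min hex hj)
    obtain ⟨wd0, hm0, hp0⟩ := (pvMb_true_iff s i0).1 hP
    have hlt : i0 < s.length := pvPos_lt hP
    rw [pvScanUp_hit (pvWordAt_some hm0 hp0) hmin hlt 0 (Nat.zero_le _)]
    by_contra hc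
    have hc' : pvMb (s.take i0 ++ [wd0.2] ++ s.drop (i0 + wd0.1.length)) 0 = true := by
      revert hc; cases pvMb (s.take i0 ++ [wd0.2] ++ s.drop (i0 + wd0.1.length)) 0 <;> simp
    obtain ⟨wd, hwd, hp⟩ := (pvMb_true_iff _ _).1 hc'
    rw [List.drop_zero] at hp
    rcases (Nat.lt_or_ge i0 wd.1.length).symm with hle | hgt
    · have htake : wd.1 = (s.take i0 ++ [wd0.2] ++ s.drop (i0 + wd0.1.length)).take wd.1.length := by
        rcases hp with ⟨u, hu⟩
        rw [← hu, List.take_left' rfl]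
      rw [List.append_assoc, List.take_append_of_le_length
          (by simp [List.length_take]; omega : wd.1.length ≤ (s.take i0).length),
        List.take_take, Nat.min_eq_left hle] at htake
      have hps : wd.1 <+: s := htake ▸ List.take_prefix _ _
      have : pvMb s 0 = true := (pvMb_true_iff s 0).2 ⟨wd, hwd, by simpa using hps⟩
      have h0 : i0 ≤ 0 := Nat.find_le this
      have := pvWordNe _ hwd
      have : wd.1.length ≠ 0 := by simpa [List.length_eq_zero_iff] using this
      omega
    · have hlen : i0 < (s.take i0 ++ [wd0.2] ++ s.drop (i0 + wd0.1.length)).length := by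
        simp [List.length_take]; omega
      have hget := hp.getElem (i := i0) hgt
      have hgetL : (s.take i0 ++ [wd0.2] ++ s.drop (i0 + wd0.1.length))[i0]'hlen = wd0.2 := by
        simp [List.length_take, Nat.min_eq_left (Nat.le_of_lt hlt)]
      have hfin : wd.1[i0] = wd0.2 := hget.trans hgetL
      exact pvDigitNotIn _ hwd _ hm0 (hfin ▸ List.getElem_mem hgt)
  · have hno : ∀ i, pvMb s i = false := fun i =>
      Bool.not_eq_true _ ▸ (by simpa using not_exists.1 hex i)
    rw [pvScanUp_none hno 0]
    exact hno 0

theorem pvRfind_le {t : List Char} {wd : List Char × Char}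
    (hnn : 0 ≤ PySem.Chars.rfind t wd.1) :
    ∃ j : Nat, PySem.Chars.rfind t wd.1 = (j : Int) ∧ wd.1 <+: t.drop j ∧
      ∀ k, j < k → k ≤ t.length → ¬ wd.1 <+: t.drop k := by
  have hgo : PySem.Chars.rfind t wd.1 = PySem.Chars.rfind.go t wd.1 t.length := rfl
  rcases pvRfindGo_spec t wd.1 t.length with ⟨h1, _⟩ | ⟨j, hj, he, hp, hmax⟩
  · rw [hgo, h1] at hnn; omega
  · exact ⟨j, hgo ▸ he, hp, hmax⟩

theorem pvPhase2_eq (t : List Char) (h0 : pvMb t 0 = false) :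
    (if (pvPhase2A t).1 then t
     else pvSplice t (pvPhase2A t).2.1 (pvPhase2A t).2.2.2 (pvLenStr (pvPhase2A t).2.2.1))
    = pvScanDown t t.length := by
  obtain ⟨hcases, hmono, hall⟩ := pvFold2_spec t pvReps (true, 0, Sum.inl 0, [])
  have hfold : pvPhase2A t = pvReps.foldl
    (fun st wd =>
      let last := PySem.Chars.rfind t wd.1
      if 0 ≤ last ∧ st.2.1 < last then (false, PySem.Chars.rfind t wd.1, Sum.inr wd.1, [wd.2]) else st)
    (true, 0, Sum.inl 0, []) := rfl
  rw [← hfold] at hcases hmono hall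
  by_cases hex : ∃ j, pvMb t j = true
  · obtain ⟨j1, hj1⟩ := hex
    have hj1lt : j1 < t.length := pvPos_lt hj1
    set j0 := Nat.findGreatest (fun j => pvMb t j = true) t.length with hj0def
    have hPj0 : pvMb t j0 = true := by
      simpa using Nat.findGreatest_spec (P := fun j => pvMb t j = true) (n := t.length)
        (Nat.le_of_lt hj1lt) hj1
    have hj0le : j1 ≤ j0 := Nat.le_findGreatest (Nat.le_of_lt hj1lt) hj1
    have hj0lt : j0 < t.length := pvPos_lt hPj0
    have hj0pos : 0 < j0 := by
      rcases Nat.eq_zero_or_pos j0 with h | h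
      · rw [h] at hPj0; rw [hPj0] at h0; exact absurd h0 (by simp)
      · exact h
    have hmax : ∀ k, j0 < k → k < t.length → pvMb t k = false := by
      intro k h1 h2
      rw [hj0def] at h1
      have h3 : ¬ pvMb t k = true :=
        Nat.findGreatest_is_greatest (P := fun j => pvMb t j = true) h1 (Nat.le_of_lt h2)
      revert h3; cases pvMb t k <;> simp
    obtain ⟨wd0, hm0, hp0⟩ := (pvMb_true_iff t j0).1 hPj0
    -- every rfind value is ≤ j0
    have hGle : ∀ wd ∈ pvReps, 0 ≤ PySem.Chars.rfind t wd.1 → PySem.Chars.rfind t wd.1 ≤ (j0 : Int) := by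
      intro wd hwd hnn
      obtain ⟨j, he, hp, _⟩ := pvRfind_le hnn
      have hjlt : j < t.length := pvPos_lt ((pvMb_true_iff t j).2 ⟨wd, hwd, hp⟩)
      have : j ≤ j0 := Nat.le_findGreatest (Nat.le_of_lt hjlt) ((pvMb_true_iff t j).2 ⟨wd, hwd, hp⟩)
      omega
    have hG0 : PySem.Chars.rfind t wd0.1 = (j0 : Int) := by
      have hnn : 0 ≤ PySem.Chars.rfind t wd0.1 := by
        have hgo : PySem.Chars.rfind t wd0.1 = PySem.Chars.rfind.go t wd0.1 t.length := rfl
        rcases pvRfindGo_spec t wd0.1 t.length with ⟨_, h2⟩ | ⟨j, hj, he, _, _⟩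
        · exact absurd hp0 (h2 j0 (Nat.le_of_lt hj0lt))
        · rw [hgo, he]; omega
      obtain ⟨j, he, hp, hmax'⟩ := pvRfind_le hnn
      have h1 : ¬ j < j0 := fun hlt => hmax' j0 hlt (Nat.le_of_lt hj0lt) hp0
      have h2 : PySem.Chars.rfind t wd0.1 ≤ (j0 : Int) := hGle wd0 hm0 hnn
      rw [he] at h2 ⊢
      have : j = j0 := by omega
      rw [this]
    rcases hcases with hid | ⟨wd, hwd, hnn, he⟩
    · exfalso
      have := hall wd0 hm0 (by rw [hG0]; positivity)
      rw [hid, hG0] at this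
      simp at this; omega
    · have hGeq : PySem.Chars.rfind t wd.1 = (j0 : Int) := by
        have hle := hGle wd hwd hnn
        have hge := hall wd0 hm0 (by rw [hG0]; positivity)
        rw [he] at hge; dsimp at hge; rw [hG0] at hge
        omega
      have hweq : wd = wd0 := by
        obtain ⟨j, hje, hp, _⟩ := pvRfind_le hnn
        rw [hGeq] at hje
        have : j = j0 := by exact_mod_cast hje.symm
        exact pvUniq hwd hm0 (this ▸ hp) hp0
      rw [he, hweq]
      simp only [if_neg (by simp : ¬ (false : Bool) = true)]
      dsimp only [pvLenStr]
      rw [hG0, pvSplice_nat]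
      rw [pvScanDown_hit (pvWordAt_some hm0 hp0) hmax t.length hj0lt (le_refl _)]
  · have hno : ∀ j, pvMb t j = false := fun j =>
      Bool.not_eq_true _ ▸ (by simpa using not_exists.1 hex j)
    rcases hcases with hid | ⟨wd, hwd, hnn, _⟩
    · rw [hid]
      dsimp only
      exact (pvScanDown_none (fun j _ => hno j) t.length (le_refl _)).symm
    · exfalso
      obtain ⟨j, _, hp, _⟩ := pvRfind_le hnn
      have := (pvMb_true_iff t j).2 ⟨wd, hwd, hp⟩
      rw [hno] at this; exact Bool.false_ne_true this

-- ===== VERDICT (by name: the statement is the Claim_ definition above) =====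
theorem replace_first_last_occurrence_spec : Claim_equal_replace_first_last_occurrence := by
  intro input_string _
  show replace_first_last_occurrence input_string = replace_first_last_occurrence_alt input_string
  unfold replace_first_last_occurrence replace_first_last_occurrence_alt
  dsimp only
  rw [pvPhase1_eq]
  exact congrArg String.ofList (pvPhase2_eq _ (pvNoMatchZero _))
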